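-- pv_equiv track=rewrite | github.com/xiaojiou176-open/OpenVibeCoding | apps/orchestrator/src/cortexpilot_orch/runners/agents_mcp_config.py | _override_model_provider_api_key
-- ===== SOURCE A (Python) =====
-- def _section_model_provider_name(section: str) -> str | None:
--     if not section.startswith("model_providers."):
--         return None
--     remainder = section[len("model_providers.") :]
--     if not remainder:
--         return None
--     if remainder.startswith('"'):
--         end = remainder.find('"', 1)
--         if end <= 1:
--             return None
--         return remainder[1:end]
--     for idx, ch in enumerate(remainder):
--         if ch == ".":
--             return remainder[:idx]
--     return remainder
--
-- def _override_model_provider_api_key(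
--     config_text: str,
--     provider: str | None,
--     api_key: str | None,
-- ) -> str:
--     if not provider or not api_key:
--         return config_text
--     lines = config_text.splitlines()
--     output: list[str] = []
--     in_section = False
--     replaced = False
--     for line in lines:
--         stripped = line.strip()
--         if stripped.startswith("[") and stripped.endswith("]"):
--             if in_section and not replaced:
--                 output.append(f'experimental_bearer_token = "{api_key}"')
--                 replaced = True
--             section_name = _section_model_provider_name(stripped[1:-1].strip())
--             in_section = section_name == provider
--             output.append(line)
--             continue
--         if in_section and (
--             stripped.startswith("experimental_bearer_token") or stripped.startswith("api_key")
--         ) and "=" in stripped: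
--             output.append(f'experimental_bearer_token = "{api_key}"')
--             replaced = True
--             continue
--         output.append(line)
--     if in_section and not replaced:
--         output.append(f'experimental_bearer_token = "{api_key}"')
--     return "\n".join(output) + "\n"
-- ===== SOURCE B (Python) =====
-- def _section_model_provider_name(section):
--     if not section.startswith("model_providers."):
--         return None
--     remainder = section[len("model_providers."):]
--     if not remainder:
--         return None
--     if remainder.startswith('"'):
--         end = remainder.find('"', 1)
--         if end <= 1:
--             return None
--         return remainder[1:end]
--     for idx, ch in enumerate(remainder):
--         if ch == ".":
--             return remainder[:idx]
--     return remainder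
--
--
-- def _is_header(line):
--     s = line.strip()
--     return s.startswith("[") and s.endswith("]")
--
--
-- def _override_model_provider_api_key(config_text, provider, api_key):
--     if not provider or not api_key:
--         return config_text
--     token = f'experimental_bearer_token = "{api_key}"'
--     # split into segments: a preamble segment, then one segment per header line
--     segments = [[]]
--     for line in config_text.splitlines():
--         if _is_header(line):
--             segments.append([line])
--         else:
--             segments[-1].append(line)
--     out = []
--     replaced = False
--     for seg in segments:
--         if seg and _is_header(seg[0]) and \
--            _section_model_provider_name(seg[0].strip()[1:-1].strip()) == provider:
--             out.append(seg[0])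
--             hit = False
--             for line in seg[1:]:
--                 s = line.strip()
--                 if (s.startswith("experimental_bearer_token") or s.startswith("api_key")) and "=" in s:
--                     out.append(token)
--                     hit = True
--                 else:
--                     out.append(line)
--             if hit:
--                 replaced = True
--             elif not replaced:
--                 out.append(token)
--                 replaced = True
--         else:
--             out.extend(seg)
--     return "\n".join(out) + "\n"
-- ===== Notes on version B (the rewrite author's own statement) =====
-- stated objective: alternative
-- what changed: B first splits the config lines once into header-delimited segments and then rewrites each segment as a unit (replacing all key lines in a matching section, appending the token at the matching segment's end under a single global replaced flag), instead of A's single line-by-line pass carrying in_section/replaced state and emitting the pending token at the next header or EOF.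
import Mathlib
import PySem

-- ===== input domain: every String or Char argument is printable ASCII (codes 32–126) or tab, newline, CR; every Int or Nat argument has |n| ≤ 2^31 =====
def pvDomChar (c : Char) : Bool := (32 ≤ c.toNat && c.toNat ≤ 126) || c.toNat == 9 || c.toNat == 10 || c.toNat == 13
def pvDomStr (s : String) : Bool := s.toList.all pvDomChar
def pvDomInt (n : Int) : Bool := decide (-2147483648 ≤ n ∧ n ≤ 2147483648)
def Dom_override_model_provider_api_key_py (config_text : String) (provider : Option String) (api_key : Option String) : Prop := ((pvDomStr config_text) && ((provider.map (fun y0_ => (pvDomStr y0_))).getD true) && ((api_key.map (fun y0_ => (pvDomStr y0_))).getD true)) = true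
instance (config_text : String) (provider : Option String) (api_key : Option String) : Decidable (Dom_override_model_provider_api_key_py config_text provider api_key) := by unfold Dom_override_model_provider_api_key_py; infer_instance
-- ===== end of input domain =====

-- B re-implements A by splitting the config into header-delimited segments once and
-- processing each segment as a unit (objective: alternative decomposition, same cost).

-- ===== A-SIDE HELPERS =====

-- the enumerate loop of _section_model_provider_name: first '.' wins, else the whole remainder
def pvScanDot (full : List Char) (idx : Nat) : List Char → List Char
  | [] => full
  | c :: rest => if c = '.' then PySem.List.slice full none (some (idx : Int))
                 else pvScanDot full (idx + 1) rest

-- _section_model_provider_name (identical helper in both Python files)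
def pvSectionName (sect : List Char) : Option (List Char) :=
  if ¬ (PySem.Chars.startswith sect ("model_providers.".toList)) then none
  else
    let remainder := PySem.List.slice sect (some 16) none
    if remainder = [] then none
    else if PySem.Chars.startswith remainder ['"'] then
      let e := PySem.Chars.findFrom remainder ['"'] 1 none
      if e ≤ 1 then none
      else some (PySem.List.slice remainder (some 1) (some e))
    else some (pvScanDot remainder 0 remainder)

-- 'stripped.startswith("[") and stripped.endswith("]")'
def pvIsHeader (line : List Char) : Bool :=
  PySem.Chars.startswith (PySem.Chars.strip line) ['[']
    && PySem.Chars.endswith (PySem.Chars.strip line) [']']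

-- '(stripped.startswith("experimental_bearer_token") or stripped.startswith("api_key")) and "=" in stripped'
def pvIsKeyLine (line : List Char) : Bool :=
  (PySem.Chars.startswith (PySem.Chars.strip line) ("experimental_bearer_token".toList)
    || PySem.Chars.startswith (PySem.Chars.strip line) ("api_key".toList))
    && PySem.Chars.isIn ['='] (PySem.Chars.strip line)

-- '_section_model_provider_name(stripped[1:-1].strip()) == provider'
def pvP (p : List Char) (line : List Char) : Bool :=
  decide (pvSectionName (PySem.Chars.strip
    (PySem.List.slice (PySem.Chars.strip line) (some 1) (some (-1)))) = some p)

-- ===== PORT A =====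
-- A's single pass: state (output, in_section, replaced)
def pvAStep (p tok : List Char) (st : List (List Char) × Bool × Bool) (line : List Char) :
    List (List Char) × Bool × Bool :=
  if pvIsHeader line then
    let out1 := if st.2.1 && !st.2.2 then st.1 ++ [tok] else st.1
    let rep1 := if st.2.1 && !st.2.2 then true else st.2.2
    (out1 ++ [line], pvP p line, rep1)
  else if st.2.1 && pvIsKeyLine line then (st.1 ++ [tok], st.2.1, true)
  else (st.1 ++ [line], st.2.1, st.2.2)

def override_model_provider_api_key_py (config_text : String) (provider : Option String) (api_key : Option String) : String :=
  match provider, api_key with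
  | some p, some k =>
    if p.toList = [] ∨ k.toList = [] then config_text
    else
      let lines := PySem.Chars.splitlines config_text.toList
      let tok := ("experimental_bearer_token = \"".toList) ++ k.toList ++ ['"']
      let r := lines.foldl (pvAStep p.toList tok) ([], false, false)
      let output := if r.2.1 && !r.2.2 then r.1 ++ [tok] else r.1
      String.ofList (PySem.Chars.join ['\n'] output ++ ['\n'])
  | _, _ => config_text

-- ===== B-SIDE HELPERS (Source B contains the identical helper source; ported separately) =====
def pvBScanDot (full : List Char) (idx : Nat) : List Char → List Char
  | [] => full
  | c :: rest => if c = '.' then PySem.List.slice full none (some (idx : Int))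
                 else pvBScanDot full (idx + 1) rest

def pvBSectionName (sect : List Char) : Option (List Char) :=
  if ¬ (PySem.Chars.startswith sect ("model_providers.".toList)) then none
  else
    let remainder := PySem.List.slice sect (some 16) none
    if remainder = [] then none
    else if PySem.Chars.startswith remainder ['"'] then
      let e := PySem.Chars.findFrom remainder ['"'] 1 none
      if e ≤ 1 then none
      else some (PySem.List.slice remainder (some 1) (some e))
    else some (pvBScanDot remainder 0 remainder)

def pvBIsHeader (line : List Char) : Bool :=
  PySem.Chars.startswith (PySem.Chars.strip line) ['[']
    && PySem.Chars.endswith (PySem.Chars.strip line) [']']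

def pvBIsKeyLine (line : List Char) : Bool :=
  (PySem.Chars.startswith (PySem.Chars.strip line) ("experimental_bearer_token".toList)
    || PySem.Chars.startswith (PySem.Chars.strip line) ("api_key".toList))
    && PySem.Chars.isIn ['='] (PySem.Chars.strip line)

def pvBP (p : List Char) (line : List Char) : Bool :=
  decide (pvBSectionName (PySem.Chars.strip
    (PySem.List.slice (PySem.Chars.strip line) (some 1) (some (-1)))) = some p)

-- ===== PORT B =====
-- segment builder: a new segment at each header, otherwise append to the last segment
def pvSegStep (segs : List (List (List Char))) (line : List Char) : List (List (List Char)) :=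
  if pvBIsHeader line then segs ++ [[line]]
  else segs.dropLast ++ [(segs.getLastD []) ++ [line]]

def pvBodyStep (tok : List Char) (st : List (List Char) × Bool) (line : List Char) :
    List (List Char) × Bool :=
  if pvBIsKeyLine line then (st.1 ++ [tok], true) else (st.1 ++ [line], st.2)

def pvSegMatches (p : List Char) (seg : List (List Char)) : Bool :=
  match seg.head? with
  | none => false
  | some h0 => pvBIsHeader h0 && pvBP p h0

-- per-segment processing with the global 'replaced' flag
def pvBStep (p tok : List Char) (st : List (List Char) × Bool) (seg : List (List Char)) :
    List (List Char) × Bool :=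
  if pvSegMatches p seg then
    let pr := (PySem.List.slice seg (some 1) none).foldl (pvBodyStep tok) ([], false)
    if pr.2 then (st.1 ++ [seg.headD []] ++ pr.1, true)
    else if !st.2 then (st.1 ++ [seg.headD []] ++ pr.1 ++ [tok], true)
    else (st.1 ++ [seg.headD []] ++ pr.1, st.2)
  else (st.1 ++ seg, st.2)

def override_model_provider_api_key_py_alt (config_text : String) (provider : Option String) (api_key : Option String) : String :=
  match provider with
  | none => config_text
  | some p =>
    match api_key with
    | none => config_text
    | some k =>
      if p.toList = [] ∨ k.toList = [] then config_text
      else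
        let tok := ("experimental_bearer_token = \"".toList) ++ k.toList ++ ['"']
        let segments := (PySem.Chars.splitlines config_text.toList).foldl pvSegStep [[]]
        let r := segments.foldl (pvBStep p.toList tok) ([], false)
        String.ofList (PySem.Chars.join ['\n'] r.1 ++ ['\n'])

-- ===== PRECONDITION & SPEC =====
def Spec_override_model_provider_api_key_py (config_text : String) (provider : Option String) (api_key : Option String) (out : String) : Prop := out = override_model_provider_api_key_py_alt config_text provider api_key
instance (config_text : String) (provider : Option String) (api_key : Option String) (out : String) : Decidable (Spec_override_model_provider_api_key_py config_text provider api_key out) := by unfold Spec_override_model_provider_api_key_py; infer_instance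

-- ===== CLAIM (what is proved, stated in full; the proofs are below) =====
def Claim_equal_override_model_provider_api_key_py : Prop := ∀ (config_text : String) (provider : Option String) (api_key : Option String), Dom_override_model_provider_api_key_py config_text provider api_key → Spec_override_model_provider_api_key_py config_text provider api_key (override_model_provider_api_key_py config_text provider api_key)

-- ===== LEMMAS AND PROOFS =====

theorem pvBScanDot_eq (full : List Char) : ∀ (idx : Nat) (rem : List Char),
    pvBScanDot full idx rem = pvScanDot full idx rem := by
  intro idx rem
  induction rem generalizing idx with
  | nil => rfl
  | cons c rest ih => simp [pvBScanDot, pvScanDot, ih]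

theorem pvBSectionName_eq (s : List Char) : pvBSectionName s = pvSectionName s := by
  simp [pvBSectionName, pvSectionName, pvBScanDot_eq]

theorem pvBIsHeader_eq (l : List Char) : pvBIsHeader l = pvIsHeader l := rfl

theorem pvBIsKeyLine_eq (l : List Char) : pvBIsKeyLine l = pvIsKeyLine l := rfl

theorem pvBP_eq (p l : List Char) : pvBP p l = pvP p l := by
  simp [pvBP, pvP, pvBSectionName_eq]

-- canonical recursion computing A's output list (loop fused with the final append)
def pvC (p tok : List Char) : List (List Char) → Bool → Bool → List (List Char)
  | [], ins, rep => if ins && !rep then [tok] else []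
  | l :: ls, ins, rep =>
    if pvIsHeader l then
      (if ins && !rep then [tok] else []) ++ l :: pvC p tok ls (pvP p l) (ins || rep)
    else if ins && pvIsKeyLine l then tok :: pvC p tok ls ins true
    else l :: pvC p tok ls ins rep

def pvAFin (tok : List Char) (st : List (List Char) × Bool × Bool) : List (List Char) :=
  if st.2.1 && !st.2.2 then st.1 ++ [tok] else st.1

theorem pvA_loop (p tok : List Char) :
    ∀ (lines : List (List Char)) (out : List (List Char)) (ins rep : Bool),
      pvAFin tok (lines.foldl (pvAStep p tok) (out, ins, rep)) = out ++ pvC p tok lines ins rep := by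
  intro lines
  induction lines with
  | nil => intro out ins rep; cases ins <;> cases rep <;> simp [pvAFin, pvC]
  | cons l ls ih =>
    intro out ins rep
    simp only [List.foldl_cons]
    cases hH : pvIsHeader l <;> cases ins <;> cases rep <;> cases hK : pvIsKeyLine l <;>
      simp [pvAStep, pvC, hH, hK, ih, List.append_assoc]

-- top-down view of B's segment-building fold
def pvSegRec (cur : List (List Char)) : List (List Char) → List (List (List Char))
  | [] => [cur]
  | l :: ls => if pvIsHeader l then cur :: pvSegRec [l] ls else pvSegRec (cur ++ [l]) ls

theorem pvSeg_fold (lines : List (List Char)) :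
    ∀ (segs : List (List (List Char))) (cur : List (List Char)),
      lines.foldl pvSegStep (segs ++ [cur]) = segs ++ pvSegRec cur lines := by
  induction lines with
  | nil => intro segs cur; simp [pvSegRec]
  | cons l ls ih =>
    intro segs cur
    simp only [List.foldl_cons]
    cases hH : pvIsHeader l
    · have : pvSegStep (segs ++ [cur]) l = segs ++ [cur ++ [l]] := by
        simp [pvSegStep, pvBIsHeader_eq, hH]
      rw [this, ih, pvSegRec]
      simp [hH]
    · have : pvSegStep (segs ++ [cur]) l = (segs ++ [cur]) ++ [[l]] := by
        simp [pvSegStep, pvBIsHeader_eq, hH]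
      rw [this, ih (segs ++ [cur]) [l], pvSegRec]
      simp [hH]

def pvWF (segs : List (List (List Char))) : Prop :=
  ∀ seg ∈ segs, ∃ h b, seg = h :: b ∧ pvIsHeader h = true ∧ ∀ l ∈ b, pvIsHeader l = false

theorem pvSplit (lines : List (List Char)) :
    ∀ cur, ∃ body segs, pvSegRec cur lines = (cur ++ body) :: segs ∧
      (∀ l ∈ body, pvIsHeader l = false) ∧ pvWF segs ∧ lines = body ++ segs.flatten := by
  induction lines with
  | nil => intro cur; exact ⟨[], [], by simp [pvSegRec], by simp, by simp [pvWF], by simp⟩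
  | cons l ls ih =>
    intro cur
    cases hH : pvIsHeader l
    · obtain ⟨body, segs, h1, h2, h3, h4⟩ := ih (cur ++ [l])
      refine ⟨l :: body, segs, ?_, ?_, h3, ?_⟩
      · rw [pvSegRec]; simp [hH, h1]
      · intro x hx; rcases List.mem_cons.mp hx with rfl | hx
        · exact hH
        · exact h2 x hx
      · simp [h4]
    · obtain ⟨body, segs, h1, h2, h3, h4⟩ := ih [l]
      refine ⟨[], (l :: body) :: segs, ?_, by simp, ?_, ?_⟩
      · rw [pvSegRec]; simp [hH, h1]
      · intro seg hseg; rcases List.mem_cons.mp hseg with rfl | hseg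
        · exact ⟨l, body, rfl, hH, h2⟩
        · exact h3 seg hseg
      · simp [h4]

theorem pvBody_fold (tok : List Char) :
    ∀ (body acc : List (List Char)) (hit : Bool),
      body.foldl (pvBodyStep tok) (acc, hit) =
        (acc ++ body.map (fun l => if pvIsKeyLine l then tok else l),
         hit || body.any pvIsKeyLine) := by
  intro body
  induction body with
  | nil => intro acc hit; simp
  | cons l b ih =>
    intro acc hit
    cases hK : pvIsKeyLine l <;>
      simp [pvBodyStep, pvBIsKeyLine_eq, hK, ih, List.append_assoc]

-- recursion computing B's segment fold output
def pvBF (p tok : List Char) : List (List (List Char)) → Bool → List (List Char)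
  | [], _ => []
  | seg :: ss, rep =>
    if pvSegMatches p seg then
      let pr := (PySem.List.slice seg (some 1) none).foldl (pvBodyStep tok) ([], false)
      if pr.2 then seg.headD [] :: pr.1 ++ pvBF p tok ss true
      else if !rep then seg.headD [] :: pr.1 ++ tok :: pvBF p tok ss true
      else seg.headD [] :: pr.1 ++ pvBF p tok ss rep
    else seg ++ pvBF p tok ss rep

theorem pvB_loop (p tok : List Char) :
    ∀ (segs : List (List (List Char))) (out : List (List Char)) (rep : Bool),
      (segs.foldl (pvBStep p tok) (out, rep)).1 = out ++ pvBF p tok segs rep := by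
  intro segs
  induction segs with
  | nil => intro out rep; simp [pvBF]
  | cons seg ss ih =>
    intro out rep
    simp only [List.foldl_cons]
    cases hm : pvSegMatches p seg <;>
      cases hp : ((PySem.List.slice seg (some 1) none).foldl (pvBodyStep tok) ([], false)).2 <;>
      cases rep <;>
      simp [pvBStep, pvBF, hm, hp, ih, List.append_assoc]

theorem pvC_body_true (p tok : List Char) :
    ∀ (body rest : List (List Char)) (rep : Bool), (∀ l ∈ body, pvIsHeader l = false) →
      pvC p tok (body ++ rest) true rep =
        body.map (fun l => if pvIsKeyLine l then tok else l)
          ++ pvC p tok rest true (rep || body.any pvIsKeyLine) := by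
  intro body
  induction body with
  | nil => intro rest rep _; simp
  | cons l b ih =>
    intro rest rep hfree
    have hH : pvIsHeader l = false := hfree l (by simp)
    have hb : ∀ x ∈ b, pvIsHeader x = false := fun x hx => hfree x (by simp [hx])
    cases hK : pvIsKeyLine l <;> cases rep <;>
      simp [pvC, hH, hK, ih _ _ hb]

theorem pvC_body_false (p tok : List Char) :
    ∀ (body rest : List (List Char)) (rep : Bool), (∀ l ∈ body, pvIsHeader l = false) →
      pvC p tok (body ++ rest) false rep = body ++ pvC p tok rest false rep := by
  intro body
  induction body with
  | nil => intro rest rep _; simp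
  | cons l b ih =>
    intro rest rep hfree
    have hH : pvIsHeader l = false := hfree l (by simp)
    have hb : ∀ x ∈ b, pvIsHeader x = false := fun x hx => hfree x (by simp [hx])
    simp [pvC, hH, ih _ _ hb]

theorem pvMain (p tok : List Char) :
    ∀ (segs : List (List (List Char))), pvWF segs → ∀ (ins rep : Bool),
      pvC p tok segs.flatten ins rep =
        (if ins && !rep then [tok] else []) ++ pvBF p tok segs (rep || ins) := by
  intro segs
  induction segs with
  | nil => intro _ ins rep; cases ins <;> cases rep <;> simp [pvC, pvBF]
  | cons seg ss ih =>
    intro hwf ins rep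
    obtain ⟨h, b, rfl, hH, hbfree⟩ := hwf seg (List.mem_cons_self ..)
    have hwf' : pvWF ss := fun s hs => hwf s (by simp [hs])
    have hflat : ((h :: b) :: ss).flatten = h :: (b ++ ss.flatten) := by simp
    rw [hflat]
    cases hp : pvP p h
    · -- non-matching segment
      have hm : pvSegMatches p (h :: b) = false := by simp [pvSegMatches, pvBP_eq, hp]
      rw [pvC]
      simp only [hH, hp, if_true]
      rw [pvC_body_false p tok b ss.flatten (ins || rep) hbfree,
        ih hwf' false (ins || rep), pvBF]
      cases ins <;> cases rep <;> simp [hm]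
    · -- matching segment
      have hm : pvSegMatches p (h :: b) = true := by simp [pvSegMatches, pvBIsHeader_eq, pvBP_eq, hH, hp]
      rw [pvC]
      simp only [hH, hp, if_true]
      rw [pvC_body_true p tok b ss.flatten (ins || rep) hbfree,
        ih hwf' true ((ins || rep) || b.any pvIsKeyLine), pvBF]
      have hsl : PySem.List.slice (h :: b) (some 1) none = b := by
        rw [PySem.List.slice_from_one]; rfl
      rw [hsl, pvBody_fold tok b [] false]
      simp only [hm]
      cases hhit : b.any pvIsKeyLine <;> cases ins <;> cases rep <;> simp

-- ===== VERDICT (by name: the statement is the Claim_ definition above) =====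
-- the two loop pipelines agree on the list of output lines
theorem pvPipelines (p tok : List Char) (lines : List (List Char)) :
    pvAFin tok (lines.foldl (pvAStep p tok) ([], false, false)) =
      ((lines.foldl pvSegStep [[]]).foldl (pvBStep p tok) ([], false)).1 := by
  obtain ⟨body, segs, h1, h2, h3, h4⟩ := pvSplit lines []
  have hsegs : lines.foldl pvSegStep [[]] = body :: segs := by
    have := pvSeg_fold lines [] []
    simpa [h1] using this
  have hb : pvSegMatches p body = false := by
    cases body with
    | nil => rfl
    | cons l b =>
      have : pvIsHeader l = false := h2 l (by simp)
      simp [pvSegMatches, pvBIsHeader_eq, this]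
  rw [pvA_loop p tok lines [] false false, hsegs, pvB_loop p tok (body :: segs) [] false]
  rw [pvBF]
  simp only [hb, if_neg Bool.false_ne_true]
  rw [h4, pvC_body_false p tok body segs.flatten false h2, pvMain p tok segs h3 false false]
  simp

theorem override_model_provider_api_key_py_spec : Claim_equal_override_model_provider_api_key_py := by
  intro config_text provider api_key _
  unfold Spec_override_model_provider_api_key_py
  unfold override_model_provider_api_key_py override_model_provider_api_key_py_alt
  cases provider with
  | none => rfl
  | some p =>
    cases api_key with
    | none => rfl
    | some k =>
      dsimp only
      by_cases hpk : p.toList = [] ∨ k.toList = []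
      · rw [if_pos hpk, if_pos hpk]
      · rw [if_neg hpk, if_neg hpk]
        have := pvPipelines p.toList
          (("experimental_bearer_token = \"".toList) ++ k.toList ++ ['"'])
          (PySem.Chars.splitlines config_text.toList)
        unfold pvAFin at this
        rw [this]
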